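-- pv_equiv track=rewrite | github.com/AntorPi314/NearbyChat | others/compress_all.py | simplify_links
-- ===== SOURCE A (Python) =====
-- def longest_common_prefix(strs):
--     """
--     Helper function for simplify_links.
--     """
--     if not strs:
--         return ""
--     min_len = min(len(s) for s in strs)
--     prefix = ""
--     for i in range(min_len):
--         ch = strs[0][i]
--         if all(s[i] == ch for s in strs):
--             prefix += ch
--         else:
--             break
--     return prefix
--
-- def simplify_links(input_str):
--     """
--     Simplifies a block of text links into a compact, single-line string.
--     """
--     links = [l.strip() for l in input_str.strip().splitlines() if l.strip()]
--     domain_dict, order = {}, []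
--     for link in links:
--         proto = ""
--         if link.startswith("https://"):
--             proto, link = "https://", link[8:]
--         elif link.startswith("http://"):
--             proto, link = "http://", link[7:]
--
--         if '/' in link:
--             domain, path = link.split('/', 1)
--         else:
--             domain, path = link, ""
--
--         if domain not in domain_dict:
--             order.append(domain)
--             domain_dict[domain] = []
--         domain_dict[domain].append((path, proto))
--
--     res = []
--     for domain in order:
--         pp = domain_dict[domain]
--         paths = [p for p, _ in pp]
--         protos = [pr for _, pr in pp]
--         proto_marker = "h:" if any(p.startswith("http://") for p in protos) else ""
--
--         if not paths or all(p == "" for p in paths):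
--             res.append(f"{proto_marker}{domain}<>")
--             continue
--
--         lcp = longest_common_prefix(paths)
--         sfx = [p[len(lcp):] for p in paths]
--
--         if lcp:
--             res.append(f"{proto_marker}{domain}/{lcp}<{ '|'.join(sfx) }>")
--         else:
--             res.append(f"{proto_marker}{domain}<{ '|'.join(paths) }>")
--
--     return "".join(res)
-- ===== SOURCE B (Python) =====
-- def _lcp2(lo, hi):
--     if lo and hi and lo[0] == hi[0]:
--         return lo[0] + _lcp2(lo[1:], hi[1:])
--     return ""
--
-- def simplify_links(input_str):
--     groups = {}
--     for raw in input_str.strip().splitlines():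
--         line = raw.strip()
--         if not line:
--             continue
--         proto = ""
--         for p in ("https://", "http://"):
--             if line.startswith(p):
--                 proto, line = p, line[len(p):]
--                 break
--         domain, _, path = line.partition('/')
--         groups.setdefault(domain, []).append((path, proto))
--     out = []
--     for domain, pp in groups.items():
--         marker = "h:" if any(pr == "http://" for _, pr in pp) else ""
--         paths = [p for p, _ in pp]
--         if all(p == "" for p in paths):
--             out.append(marker + domain + "<>")
--             continue
--         lcp = _lcp2(min(paths), max(paths))
--         sfx = "|".join(p[len(lcp):] for p in paths)
--         if lcp:
--             out.append(marker + domain + "/" + lcp + "<" + sfx + ">")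
--         else:
--             out.append(marker + domain + "<" + sfx + ">")
--     return "".join(out)
-- ===== Notes on version B (the rewrite author's own statement) =====
-- stated objective: alternative
-- what changed: longest_common_prefix is replaced by the LCP of only the two lexicographic extremes (min/max of the paths) computed by a two-string recursion, and the grouping is folded into a single skip-blank pass that relies on dict insertion order (setdefault) instead of a precomputed links list plus a separate order list.
import Mathlib
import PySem

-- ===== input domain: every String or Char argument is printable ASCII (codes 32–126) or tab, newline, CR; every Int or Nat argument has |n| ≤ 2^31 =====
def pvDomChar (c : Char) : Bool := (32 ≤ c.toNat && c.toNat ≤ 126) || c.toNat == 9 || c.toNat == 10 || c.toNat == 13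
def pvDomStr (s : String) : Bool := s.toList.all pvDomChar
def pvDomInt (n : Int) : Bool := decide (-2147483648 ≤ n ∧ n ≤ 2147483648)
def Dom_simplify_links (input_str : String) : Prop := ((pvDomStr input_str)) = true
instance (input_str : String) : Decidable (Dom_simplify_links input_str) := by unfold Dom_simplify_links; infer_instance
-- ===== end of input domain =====

-- B replaces A's all-strings-per-position LCP scan by the LCP of the two lexicographic
-- extremes (min/max) computed by a two-string recursion, and folds the grouping into a
-- single skip-blank pass over the lines using dict insertion order instead of a separate
-- `order` list (objective: alternative; return value only, no mutation involved).

-- ===== PORT A =====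
-- helper longest_common_prefix: the indexed scan with early break, recursion on i
def pvLcpLoop (strs : List (List Char)) (minLen i : Nat) (pre : List Char) : List Char :=
  if _h : i < minLen then
    let ch := (strs.headD []).getD i ' '     -- strs[0][i]; in range: i < minLen ≤ length of every s
    if strs.all (fun s => s.getD i ' ' == ch) then
      pvLcpLoop strs minLen (i+1) (pre ++ [ch])
    else pre
  else pre
termination_by minLen - i

def longest_common_prefix (strs : List (List Char)) : List Char :=
  if strs = [] then []
  else
    -- min(len(s) for s in strs); strs ≠ [] here so min? = some
    let minLen := (PySem.List.min? (strs.map List.length) (fun x => x)).getD 0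
    pvLcpLoop strs minLen 0 []

def simplify_links (input_str : String) : String :=
  let links := ((PySem.Chars.splitlines (PySem.Chars.strip input_str.toList)).filter
      (fun l => !(PySem.Chars.strip l).isEmpty)).map PySem.Chars.strip
  let st := links.foldl
    (fun (st : PySem.Dict (List Char) (List (List Char × List Char)) × List (List Char)) link =>
      let dd := st.1
      let order := st.2
      let pl :=
        if PySem.Chars.startswith link "https://".toList then
          ("https://".toList, PySem.List.slice link (some 8) none)
        else if PySem.Chars.startswith link "http://".toList then
          ("http://".toList, PySem.List.slice link (some 7) none)
        else ([], link)
      let proto := pl.1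
      let link := pl.2
      -- link.split('/', 1) guarded by '/' in link: exact for the 1-char separator
      let dp :=
        if PySem.Chars.isIn ['/'] link then
          (link.takeWhile (fun c => c ≠ '/'), (link.dropWhile (fun c => c ≠ '/')).drop 1)
        else (link, ([] : List Char))
      let domain := dp.1
      let path := dp.2
      let st2 := if dd.contains domain then (dd, order) else (dd.insert domain [], order ++ [domain])
      (st2.1.modify domain [] (fun v => v ++ [(path, proto)]), st2.2))
    (PySem.Dict.empty, [])
  let dd := st.1
  let res := st.2.foldl
    (fun res domain =>
      let pp := dd.getD domain []
      let paths := pp.map (fun x => x.1)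
      let protos := pp.map (fun x => x.2)
      let marker := if protos.any (fun p => PySem.Chars.startswith p "http://".toList) then "h:".toList else []
      if paths.isEmpty || paths.all (fun p => p == []) then
        res ++ [marker ++ domain ++ "<>".toList]
      else
        let lcp := longest_common_prefix paths
        let sfx := paths.map (fun p => PySem.List.slice p (some (lcp.length : Int)) none)
        if lcp ≠ [] then
          res ++ [marker ++ domain ++ "/".toList ++ lcp ++ "<".toList ++ PySem.Chars.join ['|'] sfx ++ ">".toList]
        else
          res ++ [marker ++ domain ++ "<".toList ++ PySem.Chars.join ['|'] paths ++ ">".toList])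
    []
  String.ofList (PySem.Chars.join [] res)

-- ===== PORT B =====
-- Source B's _lcp2: LCP of TWO strings, structural recursion
def pvLcp2 (lo hi : List Char) : List Char :=
  match lo, hi with
  | a :: lo', b :: hi' => if a == b then a :: pvLcp2 lo' hi' else []
  | _, _ => []

def simplify_links_alt (input_str : String) : String :=
  let groups := (PySem.Chars.splitlines (PySem.Chars.strip input_str.toList)).foldl
    (fun (g : PySem.Dict (List Char) (List (List Char × List Char))) raw =>
      let line := PySem.Chars.strip raw
      if line.isEmpty then g
      else
        -- for p in ("https://", "http://"): first matching prefix, as find?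
        let pl :=
          match ["https://".toList, "http://".toList].find? (fun p => PySem.Chars.startswith line p) with
          | some p => (p, line.drop p.length)
          | none => ([], line)
        -- rest.partition('/'): exact hand port for the 1-char separator
        let domain := pl.2.takeWhile (fun c => c ≠ '/')
        let path := (pl.2.dropWhile (fun c => c ≠ '/')).drop 1
        (g.setdefault domain []).modify domain [] (fun v => v ++ [(path, pl.1)]))
    PySem.Dict.empty
  let out := groups.items.map (fun di =>
    let marker := if di.2.any (fun pr => pr.2 == "http://".toList) then "h:".toList else []
    let paths := di.2.map (fun x => x.1)
    if paths.all (fun p => p == []) then marker ++ di.1 ++ "<>".toList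
    else
      -- min(paths)/max(paths); paths ≠ [] here so min?/max? = some
      let lcp := pvLcp2 ((PySem.List.min? paths (fun x => x)).getD [])
                        ((PySem.List.max? paths (fun x => x)).getD [])
      let sfx := PySem.Chars.join ['|'] (paths.map (fun p => PySem.List.slice p (some (lcp.length : Int)) none))
      if lcp ≠ [] then marker ++ di.1 ++ "/".toList ++ lcp ++ "<".toList ++ sfx ++ ">".toList
      else marker ++ di.1 ++ "<".toList ++ sfx ++ ">".toList)
  String.ofList (PySem.Chars.join [] out)

-- ===== PRECONDITION & SPEC =====
def Spec_simplify_links (input_str : String) (out : String) : Prop := out = simplify_links_alt input_str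
instance (input_str : String) (out : String) : Decidable (Spec_simplify_links input_str out) := by unfold Spec_simplify_links; infer_instance

-- ===== CLAIM (what is proved, stated in full; the proofs are below) =====
def Claim_equal_simplify_links : Prop := ∀ (input_str : String), Dom_simplify_links input_str → Spec_simplify_links input_str (simplify_links input_str)

-- ===== LEMMAS AND PROOFS =====

-- the per-line entry (domain, (path, proto)) both loops store, on an already-stripped line
def pvEntry (line : List Char) : List Char × (List Char × List Char) :=
  let pl :=
    if PySem.Chars.startswith line "https://".toList then ("https://".toList, line.drop 8)
    else if PySem.Chars.startswith line "http://".toList then ("http://".toList, line.drop 7)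
    else ([], line)
  (pl.2.takeWhile (fun c => c ≠ '/'), ((pl.2.dropWhile (fun c => c ≠ '/')).drop 1, pl.1))

def pvEntries (input_str : String) : List (List Char × (List Char × List Char)) :=
  (((PySem.Chars.splitlines (PySem.Chars.strip input_str.toList)).filter
      (fun l => !(PySem.Chars.strip l).isEmpty)).map PySem.Chars.strip).map pvEntry

def pvGroups (input_str : String) : PySem.Dict (List Char) (List (List Char × List Char)) :=
  (pvEntries input_str).foldl (fun d p => d.modify p.1 [] (fun v => v ++ [p.2])) PySem.Dict.empty

-- setdefault-then-append collapses to Python's d[k] = d.get(k, []) + [v]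
lemma setdefault_modify {ν : Type} (d : PySem.Dict (List Char) (List ν)) (k : List Char)
    (f : List ν → List ν) : (d.setdefault k []).modify k [] f = d.modify k [] f := by
  by_cases h : d.contains k
  · rw [PySem.Dict.setdefault_of_contains d _ h]
  · rw [PySem.Dict.setdefault_of_not_contains d _ (by simpa using h)]
    simp [PySem.Dict.modify, PySem.Dict.insert_insert_self,
      PySem.Dict.getD_insert_self, PySem.Dict.getD_of_not_contains d _ (by simpa using h)]


lemma slice8 (l : List Char) : PySem.List.slice l (some 8) none = l.drop 8 := by
  simpa using PySem.List.slice_from l (a := 8) (by norm_num)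

lemma slice7 (l : List Char) : PySem.List.slice l (some 7) none = l.drop 7 := by
  simpa using PySem.List.slice_from l (a := 7) (by norm_num)

lemma slice0 (l : List Char) : PySem.List.slice l (some 0) none = l := by
  simpa using PySem.List.slice_from l (a := 0) (le_refl 0)

lemma split1_eq (l : List Char) (h : PySem.Chars.isIn ['/'] l = false) :
    l.takeWhile (fun c => c ≠ '/') = l ∧ (l.dropWhile (fun c => c ≠ '/')).drop 1 = [] := by
  have hmem : '/' ∉ l := by
    intro hm
    have : PySem.Chars.isIn ['/'] l = true :=
      (PySem.Chars.isIn_iff_infix _ _).mpr ((List.singleton_infix_iff _ _).mpr hm)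
    rw [h] at this
    exact Bool.false_ne_true this
  constructor
  · rw [List.takeWhile_eq_self_iff]
    intro x hx
    simp only [ne_eq, decide_eq_true_eq]
    exact fun he => hmem (he ▸ hx)
  · rw [List.dropWhile_eq_nil_iff.mpr]
    · rfl
    · intro x hx
      simp only [ne_eq, decide_eq_true_eq]
      exact fun he => hmem (he ▸ hx)

lemma keys_step (d : PySem.Dict (List Char) (List (List Char × List Char))) (k : List Char)
    (f : List (List Char × List Char) → List (List Char × List Char)) :
    (d.modify k [] f).keys = if d.contains k then d.keys else d.keys ++ [k] := by
  rw [PySem.Dict.keys_modify]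
  by_cases h : d.contains k
  · simp [h, PySem.Dict.keys_insert_of_contains d _ h]
  · simp [h, PySem.Dict.keys_insert_of_not_contains d _ (by simpa using h)]

lemma step_core (d : PySem.Dict (List Char) (List (List Char × List Char))) (k path proto : List Char) :
    ((if d.contains k then (d, d.keys) else (d.insert k [], d.keys ++ [k])).1.modify k []
        (fun v => v ++ [(path, proto)]),
     (if d.contains k then (d, d.keys) else (d.insert k [], d.keys ++ [k])).2)
    = (d.modify k [] (fun v => v ++ [(path, proto)]),
       (d.modify k [] (fun v => v ++ [(path, proto)])).keys) := by
  by_cases h : d.contains k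
  · simp only [h, if_true]
    rw [keys_step]
    simp [h]
  · have h' : d.contains k = false := by simpa using h
    simp only [h', Bool.false_eq_true, if_false]
    rw [← PySem.Dict.setdefault_of_not_contains d _ h', setdefault_modify, keys_step]
    simp [h']

lemma A_fold (L : List (List Char)) (d : PySem.Dict (List Char) (List (List Char × List Char))) :
    L.foldl
    (fun (st : PySem.Dict (List Char) (List (List Char × List Char)) × List (List Char)) link =>
      let dd := st.1
      let order := st.2
      let pl :=
        if PySem.Chars.startswith link "https://".toList then
          ("https://".toList, PySem.List.slice link (some 8) none)
        else if PySem.Chars.startswith link "http://".toList then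
          ("http://".toList, PySem.List.slice link (some 7) none)
        else ([], link)
      let proto := pl.1
      let link := pl.2
      let dp :=
        if PySem.Chars.isIn ['/'] link then
          (link.takeWhile (fun c => c ≠ '/'), (link.dropWhile (fun c => c ≠ '/')).drop 1)
        else (link, ([] : List Char))
      let domain := dp.1
      let path := dp.2
      let st2 := if dd.contains domain then (dd, order) else (dd.insert domain [], order ++ [domain])
      (st2.1.modify domain [] (fun v => v ++ [(path, proto)]), st2.2))
    (d, d.keys) =
    (L.foldl (fun g link => g.modify (pvEntry link).1 [] (fun v => v ++ [(pvEntry link).2])) d,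
     (L.foldl (fun g link => g.modify (pvEntry link).1 [] (fun v => v ++ [(pvEntry link).2])) d).keys) := by
  induction L generalizing d with
  | nil => rfl
  | cons l L ih =>
    rw [List.foldl_cons, List.foldl_cons]
    have hstep :
        (let dd := (d, d.keys).1
         let order := (d, d.keys).2
         let pl :=
           if PySem.Chars.startswith l "https://".toList then
             ("https://".toList, PySem.List.slice l (some 8) none)
           else if PySem.Chars.startswith l "http://".toList then
             ("http://".toList, PySem.List.slice l (some 7) none)
           else ([], l)
         let proto := pl.1
         let link := pl.2
         let dp :=
           if PySem.Chars.isIn ['/'] link then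
             (link.takeWhile (fun c => c ≠ '/'), (link.dropWhile (fun c => c ≠ '/')).drop 1)
           else (link, ([] : List Char))
         let domain := dp.1
         let path := dp.2
         let st2 := if dd.contains domain then (dd, order) else (dd.insert domain [], order ++ [domain])
         (st2.1.modify domain [] (fun v => v ++ [(path, proto)]), st2.2)) =
        (d.modify (pvEntry l).1 [] (fun v => v ++ [(pvEntry l).2]),
         (d.modify (pvEntry l).1 [] (fun v => v ++ [(pvEntry l).2])).keys) := by
      simp only [pvEntry, slice8, slice7]
      by_cases h1 : PySem.Chars.startswith l "https://".toList
      · simp only [h1, if_true]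
        by_cases h3 : PySem.Chars.isIn ['/'] (l.drop 8)
        · simp only [h3, if_true]
          exact step_core d _ _ _
        · have h3' : PySem.Chars.isIn ['/'] (l.drop 8) = false := by simpa using h3
          simp only [h3', Bool.false_eq_true, if_false, (split1_eq _ h3').1, (split1_eq _ h3').2]
          exact step_core d _ _ _
      · have h1' : PySem.Chars.startswith l "https://".toList = false := by simpa using h1
        by_cases h2 : PySem.Chars.startswith l "http://".toList
        · simp only [h1', h2, Bool.false_eq_true, if_false, if_true]
          by_cases h3 : PySem.Chars.isIn ['/'] (l.drop 7)
          · simp only [h3, if_true]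
            exact step_core d _ _ _
          · have h3' : PySem.Chars.isIn ['/'] (l.drop 7) = false := by simpa using h3
            simp only [h3', Bool.false_eq_true, if_false, (split1_eq _ h3').1, (split1_eq _ h3').2]
            exact step_core d _ _ _
        · have h2' : PySem.Chars.startswith l "http://".toList = false := by simpa using h2
          simp only [h1', h2', Bool.false_eq_true, if_false]
          by_cases h3 : PySem.Chars.isIn ['/'] l
          · simp only [h3, if_true]
            exact step_core d _ _ _
          · have h3' : PySem.Chars.isIn ['/'] l = false := by simpa using h3
            simp only [h3', Bool.false_eq_true, if_false, (split1_eq _ h3').1, (split1_eq _ h3').2]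
            exact step_core d _ _ _
    rw [hstep]
    exact ih _

lemma A_loop_eq (input_str : String) :
    (((PySem.Chars.splitlines (PySem.Chars.strip input_str.toList)).filter
      (fun l => !(PySem.Chars.strip l).isEmpty)).map PySem.Chars.strip).foldl
    (fun (st : PySem.Dict (List Char) (List (List Char × List Char)) × List (List Char)) link =>
      let dd := st.1
      let order := st.2
      let pl :=
        if PySem.Chars.startswith link "https://".toList then
          ("https://".toList, PySem.List.slice link (some 8) none)
        else if PySem.Chars.startswith link "http://".toList then
          ("http://".toList, PySem.List.slice link (some 7) none)
        else ([], link)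
      let proto := pl.1
      let link := pl.2
      let dp :=
        if PySem.Chars.isIn ['/'] link then
          (link.takeWhile (fun c => c ≠ '/'), (link.dropWhile (fun c => c ≠ '/')).drop 1)
        else (link, ([] : List Char))
      let domain := dp.1
      let path := dp.2
      let st2 := if dd.contains domain then (dd, order) else (dd.insert domain [], order ++ [domain])
      (st2.1.modify domain [] (fun v => v ++ [(path, proto)]), st2.2))
    (PySem.Dict.empty, []) = (pvGroups input_str, (pvGroups input_str).keys) := by
  conv_rhs => rw [pvGroups, pvEntries, List.foldl_map]
  exact A_fold _ _

lemma B_fold (L : List (List Char)) (g : PySem.Dict (List Char) (List (List Char × List Char))) :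
    L.foldl
    (fun (g : PySem.Dict (List Char) (List (List Char × List Char))) raw =>
      let line := PySem.Chars.strip raw
      if line.isEmpty then g
      else
        let pl :=
          match ["https://".toList, "http://".toList].find? (fun p => PySem.Chars.startswith line p) with
          | some p => (p, line.drop p.length)
          | none => ([], line)
        let domain := pl.2.takeWhile (fun c => c ≠ '/')
        let path := (pl.2.dropWhile (fun c => c ≠ '/')).drop 1
        (g.setdefault domain []).modify domain [] (fun v => v ++ [(path, pl.1)]))
    g
    = (L.filter (fun raw => !(PySem.Chars.strip raw).isEmpty)).foldl
        (fun d y => d.modify (pvEntry (PySem.Chars.strip y)).1 []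
          (fun v => v ++ [(pvEntry (PySem.Chars.strip y)).2])) g := by
  induction L generalizing g with
  | nil => rfl
  | cons l L ih =>
    rw [List.foldl_cons, List.filter_cons]
    by_cases h : (PySem.Chars.strip l).isEmpty
    · have hskip : (let line := PySem.Chars.strip l
         if line.isEmpty then g
         else
           let pl :=
             match ["https://".toList, "http://".toList].find? (fun p => PySem.Chars.startswith line p) with
             | some p => (p, line.drop p.length)
             | none => ([], line)
           let domain := pl.2.takeWhile (fun c => c ≠ '/')
           let path := (pl.2.dropWhile (fun c => c ≠ '/')).drop 1
           (g.setdefault domain []).modify domain [] (fun v => v ++ [(path, pl.1)])) = g := by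
        rw [if_pos h]
      rw [hskip]
      simp only [h, Bool.not_true, Bool.false_eq_true, if_false]
      exact ih g
    · have h' : (PySem.Chars.strip l).isEmpty = false := by simpa using h
      have hstep : (let line := PySem.Chars.strip l
         if line.isEmpty then g
         else
           let pl :=
             match ["https://".toList, "http://".toList].find? (fun p => PySem.Chars.startswith line p) with
             | some p => (p, line.drop p.length)
             | none => ([], line)
           let domain := pl.2.takeWhile (fun c => c ≠ '/')
           let path := (pl.2.dropWhile (fun c => c ≠ '/')).drop 1
           (g.setdefault domain []).modify domain [] (fun v => v ++ [(path, pl.1)])) =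
          g.modify (pvEntry (PySem.Chars.strip l)).1 []
            (fun v => v ++ [(pvEntry (PySem.Chars.strip l)).2]) := by
        rw [if_neg (by simp [h'])]
        have h8 : ("https://".toList).length = 8 := by decide
        have h7 : ("http://".toList).length = 7 := by decide
        simp only [pvEntry, List.find?]
        by_cases h1 : PySem.Chars.startswith (PySem.Chars.strip l) "https://".toList
        · simp only [h1, if_true, h8, setdefault_modify]
        · have h1' : PySem.Chars.startswith (PySem.Chars.strip l) "https://".toList = false := by
            simpa using h1
          by_cases h2 : PySem.Chars.startswith (PySem.Chars.strip l) "http://".toList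
          · simp only [h1', h2, Bool.false_eq_true, if_false, if_true, h7, setdefault_modify]
          · have h2' : PySem.Chars.startswith (PySem.Chars.strip l) "http://".toList = false := by
              simpa using h2
            simp only [h1', h2', Bool.false_eq_true, if_false, setdefault_modify]
      rw [hstep]
      simp only [h', Bool.not_false, if_true]
      exact ih _

lemma B_loop_eq (input_str : String) :
    (PySem.Chars.splitlines (PySem.Chars.strip input_str.toList)).foldl
    (fun (g : PySem.Dict (List Char) (List (List Char × List Char))) raw =>
      let line := PySem.Chars.strip raw
      if line.isEmpty then g
      else
        let pl :=
          match ["https://".toList, "http://".toList].find? (fun p => PySem.Chars.startswith line p) with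
          | some p => (p, line.drop p.length)
          | none => ([], line)
        let domain := pl.2.takeWhile (fun c => c ≠ '/')
        let path := (pl.2.dropWhile (fun c => c ≠ '/')).drop 1
        (g.setdefault domain []).modify domain [] (fun v => v ++ [(path, pl.1)]))
    PySem.Dict.empty = pvGroups input_str := by
  conv_rhs => rw [pvGroups, pvEntries, List.foldl_map, List.foldl_map]
  exact B_fold _ _

-- ===== the LCP argument =====

lemma prefix_pvLcp2 (q lo hi : List Char) (h1 : q <+: lo) (h2 : q <+: hi) : q <+: pvLcp2 lo hi := by
  induction q generalizing lo hi with
  | nil => simp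
  | cons x q' ih =>
    cases lo with
    | nil => simp at h1
    | cons a lo' =>
      cases hi with
      | nil => simp at h2
      | cons b hi' =>
        obtain ⟨hx1, hq1⟩ := List.cons_prefix_cons.mp h1
        obtain ⟨hx2, hq2⟩ := List.cons_prefix_cons.mp h2
        subst hx1; subst hx2
        simp only [pvLcp2, BEq.rfl, if_true]
        exact List.cons_prefix_cons.mpr ⟨rfl, ih _ _ hq1 hq2⟩

lemma cons_le_cons_char (a c : Char) (l m : List Char) :
    a :: l ≤ c :: m ↔ a < c ∨ (a = c ∧ l ≤ m) := by
  rw [← Std.not_lt, List.cons_lt_cons_iff]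
  push Not
  constructor
  · rintro ⟨h1, h2⟩
    rcases eq_or_lt_of_le h1 with h | h
    · exact Or.inr ⟨h, h2 h.symm⟩
    · exact Or.inl h
  · rintro (h | ⟨rfl, h⟩)
    · exact ⟨le_of_lt h, fun he => absurd he.symm (ne_of_lt h)⟩
    · exact ⟨le_refl a, fun _ => h⟩

-- lexicographic sandwich: the common prefix of the two extremes is a prefix of everything between
lemma pvLcp2_sandwich (lo hi s : List Char) (h1 : lo ≤ s) (h2 : s ≤ hi) : pvLcp2 lo hi <+: s := by
  induction lo generalizing hi s with
  | nil => simp [pvLcp2]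
  | cons a lo' ih =>
    cases hi with
    | nil => cases s <;> simp [pvLcp2]
    | cons b hi' =>
      simp only [pvLcp2]
      split
      · next hab =>
        have hab' : a = b := beq_iff_eq.mp hab
        subst hab'
        cases s with
        | nil => exact absurd h1 (by simp [← Std.not_lt, List.nil_lt_cons])
        | cons c s' =>
          rcases (cons_le_cons_char a c lo' s').mp h1 with h | ⟨rfl, hls⟩
          · rcases (cons_le_cons_char c a s' hi').mp h2 with h' | ⟨rfl, _⟩
            · exact absurd (h.trans h') (lt_irrefl _)
            · exact absurd h (lt_irrefl _)
          · rcases (cons_le_cons_char a a s' hi').mp h2 with h' | ⟨_, hsh⟩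
            · exact absurd h' (lt_irrefl _)
            · exact List.cons_prefix_cons.mpr ⟨rfl, ih _ _ hls hsh⟩
      · simp

lemma pvLcpLoop_acc (strs : List (List Char)) (minLen i : Nat) (pre : List Char) :
    pvLcpLoop strs minLen i pre = pre ++ pvLcpLoop strs minLen i [] := by
  induction hfuel : minLen - i using Nat.strong_induction_on generalizing i pre with
  | _ n ih =>
  rw [pvLcpLoop, pvLcpLoop]
  dsimp only
  split
  · next h =>
    split
    · rw [ih (minLen - (i+1)) (by omega) (i+1) _ rfl]
      conv_rhs => rw [ih (minLen - (i+1)) (by omega) (i+1) _ rfl]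
      simp
    · simp
  · simp

lemma pvLcpLoop_spec (strs : List (List Char)) (minLen : Nat)
    (hlen : ∀ s ∈ strs, minLen ≤ s.length) (hmin : ∃ s ∈ strs, s.length = minLen)
    (i : Nat) :
    (∀ s ∈ strs, pvLcpLoop strs minLen i [] <+: s.drop i) ∧
    (∀ q, (∀ s ∈ strs, q <+: s.drop i) → q <+: pvLcpLoop strs minLen i []) := by
  induction hfuel : minLen - i using Nat.strong_induction_on generalizing i with
  | _ n ih =>
  rw [pvLcpLoop]
  dsimp only
  split
  · next hi =>
    split
    · next hall =>
      -- all chars at position i agree with ch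
      obtain ⟨hpre, hmax⟩ := ih (minLen - (i+1)) (by omega) (i+1) rfl
      rw [pvLcpLoop_acc]
      simp only [List.nil_append, List.singleton_append]
      set ch := (strs.headD []).getD i ' ' with hch
      set t := pvLcpLoop strs minLen (i+1) [] with ht
      have hchar : ∀ s ∈ strs, s.getD i ' ' = ch := by
        intro s hs
        exact beq_iff_eq.mp (List.all_eq_true.mp hall s hs)
      have hdrop : ∀ s ∈ strs, s.drop i = ch :: s.drop (i+1) := by
        intro s hs
        have hl : i < s.length := lt_of_lt_of_le hi (hlen s hs)
        rw [List.drop_eq_getElem_cons hl, ← List.getD_eq_getElem s ' ' hl, hchar s hs]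
      constructor
      · intro s hs
        rw [hdrop s hs]
        exact List.cons_prefix_cons.mpr ⟨rfl, hpre s hs⟩
      · intro q hq
        cases q with
        | nil => simp
        | cons x q' =>
          have hsome : ∀ s ∈ strs, x = ch ∧ q' <+: s.drop (i+1) := by
            intro s hs
            have := hq s hs
            rw [hdrop s hs] at this
            exact List.cons_prefix_cons.mp this
          obtain ⟨s0, hs0⟩ := hmin
          obtain ⟨hx, _⟩ := hsome s0 hs0.1
          subst hx
          exact List.cons_prefix_cons.mpr ⟨rfl, hmax q' (fun s hs => (hsome s hs).2)⟩
    · next hnall =>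
      -- some string disagrees at i: any common prefix of the drops is empty
      constructor
      · intro s hs; simp
      · intro q hq
        cases q with
        | nil => simp
        | cons x q' =>
          exfalso
          rw [List.all_eq_true] at hnall
          push Not at hnall
          obtain ⟨s1, hs1, hne⟩ := hnall
          have hne' : s1.getD i ' ' ≠ (strs.headD []).getD i ' ' := by simpa using hne
          -- head of strs is a member (strs nonempty since s1 ∈ strs)
          have hs0 : strs.headD [] ∈ strs := by
            cases strs with
            | nil => simp at hs1
            | cons a l => simp
          have h1 : x = s1.getD i ' ' := by
            have := hq s1 hs1
            have hl : i < s1.length := lt_of_lt_of_le hi (hlen s1 hs1)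
            rw [List.drop_eq_getElem_cons hl] at this
            rw [List.getD_eq_getElem s1 ' ' hl]
            exact (List.cons_prefix_cons.mp this).1
          have h2 : x = (strs.headD []).getD i ' ' := by
            have := hq _ hs0
            have hl : i < (strs.headD []).length := lt_of_lt_of_le hi (hlen _ hs0)
            rw [List.drop_eq_getElem_cons hl] at this
            rw [List.getD_eq_getElem _ ' ' hl]
            exact (List.cons_prefix_cons.mp this).1
          exact hne' (h1 ▸ h2)
  · next hi =>
    -- i ≥ minLen: the minimal string's drop is empty
    constructor
    · intro s hs; simp
    · intro q hq
      obtain ⟨s0, hs0, hlen0⟩ := hmin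
      have := hq s0 hs0
      rw [List.drop_eq_nil_of_le (by omega)] at this
      simpa using List.prefix_nil.mp this

lemma lcp_common (strs : List (List Char)) (h : strs ≠ []) :
    (∀ s ∈ strs, longest_common_prefix strs <+: s) ∧
    (∀ q, (∀ s ∈ strs, q <+: s) → q <+: longest_common_prefix strs) := by
  rw [longest_common_prefix, if_neg h]
  obtain ⟨m, hm⟩ : ∃ m, PySem.List.min? (strs.map List.length) (fun x => x) = some m := by
    cases h2 : PySem.List.min? (strs.map List.length) (fun x => x) with
    | none => exact absurd ((PySem.List.min?_eq_none_iff _ _).mp h2) (by simpa using h)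
    | some m => exact ⟨m, rfl⟩
  rw [hm]
  simp only [Option.getD_some]
  have hlen : ∀ s ∈ strs, m ≤ s.length := by
    intro s hs
    exact PySem.List.min?_isMin hm _ (List.mem_map_of_mem hs)
  have hmin : ∃ s ∈ strs, s.length = m := by
    obtain ⟨s, hs, hl⟩ := List.mem_map.mp (PySem.List.min?_mem hm)
    exact ⟨s, hs, hl⟩
  have := pvLcpLoop_spec strs m hlen hmin 0
  simpa using this

-- A's LCP = B's LCP of the lexicographic extremes
lemma lcp_eq (strs : List (List Char)) (h : strs ≠ []) :
    longest_common_prefix strs =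
      pvLcp2 ((PySem.List.min? strs (fun x => x)).getD [])
             ((PySem.List.max? strs (fun x => x)).getD []) := by
  obtain ⟨lo, hlo⟩ : ∃ lo, PySem.List.min? strs (fun x => x) = some lo := by
    cases h2 : PySem.List.min? strs (fun x => x) with
    | none => exact absurd ((PySem.List.min?_eq_none_iff _ _).mp h2) h
    | some lo => exact ⟨lo, rfl⟩
  obtain ⟨hi, hhi⟩ : ∃ hi, PySem.List.max? strs (fun x => x) = some hi := by
    cases h2 : PySem.List.max? strs (fun x => x) with
    | none => exact absurd ((PySem.List.max?_eq_none_iff _ _).mp h2) h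
    | some hi => exact ⟨hi, rfl⟩
  rw [hlo, hhi]
  simp only [Option.getD_some]
  obtain ⟨hcp, hmax⟩ := lcp_common strs h
  refine List.Sublist.antisymm ?_ ?_
  · exact (prefix_pvLcp2 _ _ _ (hcp lo (PySem.List.min?_mem hlo)) (hcp hi (PySem.List.max?_mem hhi))).sublist
  · refine (hmax _ (fun s hs => ?_)).sublist
    have hlo' : @PySem.List.min? (List Char) (List Char) LinearOrder.toPartialOrder.toLT
        LinearOrder.toDecidableLT strs (fun x => x) = some lo := by convert hlo using 2
    have hhi' : @PySem.List.max? (List Char) (List Char) LinearOrder.toPartialOrder.toLT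
        LinearOrder.toDecidableLT strs (fun x => x) = some hi := by convert hhi using 2
    have h1 := PySem.List.min?_isMin hlo' s hs
    have h2 := PySem.List.max?_isMax hhi' s hs
    exact pvLcp2_sandwich lo hi s h1 h2

-- every proto stored in a group value is "", "http://" or "https://"
lemma proto_range (input_str : String) (k : List Char) (pr : List Char × List Char)
    (h : pr ∈ (pvGroups input_str).getD k []) :
    pr.2 = [] ∨ pr.2 = "http://".toList ∨ pr.2 = "https://".toList := by
  rw [pvGroups, PySem.Dict.getD_foldl_modify_append] at h
  simp only [PySem.Dict.getD_empty, List.nil_append, List.mem_map, List.mem_filter] at h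
  obtain ⟨e, ⟨he, _⟩, rfl⟩ := h
  rw [pvEntries] at he
  simp only [List.mem_map] at he
  obtain ⟨line, _, rfl⟩ := he
  simp only [pvEntry]
  split_ifs with h1 h2 <;> simp

lemma marker_eq (pp : List (List Char × List Char))
    (hr : ∀ pr ∈ pp, pr.2 = [] ∨ pr.2 = "http://".toList ∨ pr.2 = "https://".toList) :
    (pp.map (fun x => x.2)).any (fun p => PySem.Chars.startswith p "http://".toList) =
      pp.any (fun pr => pr.2 == "http://".toList) := by
  induction pp with
  | nil => rfl
  | cons a t ih =>
    simp only [List.map_cons, List.any_cons]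
    rw [ih (fun pr h => hr pr (List.mem_cons_of_mem _ h))]
    congr 1
    rcases hr a (by simp) with h | h | h <;> rw [h] <;> decide

-- ===== VERDICT (by name: the statement is the Claim_ definition above) =====
set_option maxHeartbeats 6000000 in
theorem simplify_links_spec : Claim_equal_simplify_links := by
  intro s _hdom
  unfold Spec_simplify_links
  unfold simplify_links simplify_links_alt
  dsimp only
  rw [A_loop_eq s, B_loop_eq s]
  dsimp only
  have hnodup : (pvGroups s).keys.Nodup := by
    rw [pvGroups]
    exact PySem.Dict.nodup_keys_foldl_modify_key (pvEntries s) (fun p => p.1) []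
      (fun _ p v => v ++ [p.2]) PySem.Dict.empty PySem.Dict.nodup_keys_empty
  have hf : (fun (res : List (List Char)) (domain : List Char) =>
        if ((List.map (fun x => x.1) ((pvGroups s).getD domain [])).isEmpty || (List.map (fun x => x.1) ((pvGroups s).getD domain [])).all fun p => p == []) = true then res ++ [(if ((List.map (fun x => x.2) ((pvGroups s).getD domain [])).any fun p => PySem.Chars.startswith p "http://".toList) = true then "h:".toList else []) ++ domain ++ "<>".toList]
        else if longest_common_prefix (List.map (fun x => x.1) ((pvGroups s).getD domain [])) ≠ [] then res ++ [(if ((List.map (fun x => x.2) ((pvGroups s).getD domain [])).any fun p => PySem.Chars.startswith p "http://".toList) = true then "h:".toList else []) ++ domain ++ "/".toList ++ longest_common_prefix (List.map (fun x => x.1) ((pvGroups s).getD domain [])) ++ "<".toList ++ PySem.Chars.join ['|'] (List.map (fun p => PySem.List.slice p (some ((longest_common_prefix (List.map (fun x => x.1) ((pvGroups s).getD domain []))).length : Int)) none) (List.map (fun x => x.1) ((pvGroups s).getD domain []))) ++ ">".toList]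
        else res ++ [(if ((List.map (fun x => x.2) ((pvGroups s).getD domain [])).any fun p => PySem.Chars.startswith p "http://".toList) = true then "h:".toList else []) ++ domain ++ "<".toList ++ PySem.Chars.join ['|'] (List.map (fun x => x.1) ((pvGroups s).getD domain [])) ++ ">".toList]) =
      (fun (res : List (List Char)) (domain : List Char) =>
        res ++ [if ((List.map (fun x => x.1) ((pvGroups s).getD domain [])).isEmpty || (List.map (fun x => x.1) ((pvGroups s).getD domain [])).all fun p => p == []) = true then (if ((List.map (fun x => x.2) ((pvGroups s).getD domain [])).any fun p => PySem.Chars.startswith p "http://".toList) = true then "h:".toList else []) ++ domain ++ "<>".toList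
        else if longest_common_prefix (List.map (fun x => x.1) ((pvGroups s).getD domain [])) ≠ [] then (if ((List.map (fun x => x.2) ((pvGroups s).getD domain [])).any fun p => PySem.Chars.startswith p "http://".toList) = true then "h:".toList else []) ++ domain ++ "/".toList ++ longest_common_prefix (List.map (fun x => x.1) ((pvGroups s).getD domain [])) ++ "<".toList ++ PySem.Chars.join ['|'] (List.map (fun p => PySem.List.slice p (some ((longest_common_prefix (List.map (fun x => x.1) ((pvGroups s).getD domain []))).length : Int)) none) (List.map (fun x => x.1) ((pvGroups s).getD domain []))) ++ ">".toList
        else (if ((List.map (fun x => x.2) ((pvGroups s).getD domain [])).any fun p => PySem.Chars.startswith p "http://".toList) = true then "h:".toList else []) ++ domain ++ "<".toList ++ PySem.Chars.join ['|'] (List.map (fun x => x.1) ((pvGroups s).getD domain [])) ++ ">".toList]) := by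
    funext res domain
    split_ifs <;> rfl
  rw [hf, PySem.List.foldl_append_eq_flatMap,
    PySem.Dict.items_eq_map_keys (pvGroups s) hnodup [], List.map_map]
  refine congrArg _ (congrArg _ ?_)
  rw [List.nil_append, ← List.map_eq_flatMap]
  refine List.map_congr_left (fun k hk => ?_)
  dsimp only [Function.comp]
  have hmk := marker_eq ((pvGroups s).getD k []) (proto_range s k)
  rw [hmk]
  have hbr : ((List.map (fun x => x.1) ((pvGroups s).getD k [])).isEmpty ||
      (List.map (fun x => x.1) ((pvGroups s).getD k [])).all (fun p => p == [])) =
      (List.map (fun x => x.1) ((pvGroups s).getD k [])).all (fun p => p == []) := by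
    cases hc : List.map (fun x => x.1) ((pvGroups s).getD k []) <;> simp
  rw [hbr]
  by_cases hall : (List.map (fun x => x.1) ((pvGroups s).getD k [])).all (fun p => p == []) = true
  · rw [if_pos hall, if_pos hall]
  · rw [if_neg hall, if_neg hall]
    have hne : List.map (fun x => x.1) ((pvGroups s).getD k []) ≠ [] := by
      intro h0
      rw [h0] at hall
      exact hall rfl
    rw [lcp_eq _ hne]
    rcases eq_or_ne (pvLcp2
        ((PySem.List.min? (List.map (fun x => x.1) ((pvGroups s).getD k [])) (fun x => x)).getD [])
        ((PySem.List.max? (List.map (fun x => x.1) ((pvGroups s).getD k [])) (fun x => x)).getD []))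
        [] with hl | hl
    · rw [if_neg (c := (pvLcp2
        ((PySem.List.min? (List.map (fun x => x.1) ((pvGroups s).getD k [])) (fun x => x)).getD [])
        ((PySem.List.max? (List.map (fun x => x.1) ((pvGroups s).getD k [])) (fun x => x)).getD [])) ≠ []) (fun hc => hc hl), if_neg (c := (pvLcp2
        ((PySem.List.min? (List.map (fun x => x.1) ((pvGroups s).getD k [])) (fun x => x)).getD [])
        ((PySem.List.max? (List.map (fun x => x.1) ((pvGroups s).getD k [])) (fun x => x)).getD [])) ≠ []) (fun hc => hc hl), hl]
      simp only [List.length_nil, Nat.cast_zero, slice0, List.map_id']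
    · rw [if_pos hl, if_pos hl]
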